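-- pv_equiv track=rewrite | github.com/Durgance/Coding-Problems | 1903-largest-odd-number-in-string/1903-largest-odd-number-in-string.py | largestOddNumber
-- ===== SOURCE A (Python) =====
-- def largestOddNumber(num: str) -> str:
--     max_num = 0
--     left = 0
--     right = len(num)-1
--     if len(num) == 1:
--         if int(num)%2!=0:
--             return num
--         return ""
--     while True:
--         if int(num[right]) %2 != 0:
--             return num[:right+1]
--         else:
--             right-=1
--         if left == right :
--             if int(num[left])%2 !=0:
--                 return num[left]
--             break
--     return ""
-- ===== SOURCE B (Python) =====
-- def largestOddNumber(num: str) -> str: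
--     # Divide and conquer: if the right half contains an odd digit, the answer
--     # is the left half plus the right half's answer; otherwise it is the left
--     # half's answer. A single character answers itself iff it is an odd digit.
--     if len(num) <= 1:
--         return num if num and int(num) % 2 else ""
--     mid = len(num) // 2
--     right = largestOddNumber(num[mid:])
--     if right:
--         return num[:mid] + right
--     return largestOddNumber(num[:mid])
-- ===== Notes on version B (the rewrite author's own statement) =====
-- stated objective: alternative
-- what changed: B replaces A's right-to-left index loop (with early returns and a separate length-1 case) by a balanced divide-and-conquer recursion: the answer is the left half plus the right half's answer when that is non-empty, else the left half's answer, with single characters as base case.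
-- crash fix: A raises IndexError on the empty string where B returns the empty string; on non-digit characters reached while peeling trailing even digits both raise ValueError. — e.g. on largestOddNumber(""): A raises IndexError, B returns ""
import Mathlib
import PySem

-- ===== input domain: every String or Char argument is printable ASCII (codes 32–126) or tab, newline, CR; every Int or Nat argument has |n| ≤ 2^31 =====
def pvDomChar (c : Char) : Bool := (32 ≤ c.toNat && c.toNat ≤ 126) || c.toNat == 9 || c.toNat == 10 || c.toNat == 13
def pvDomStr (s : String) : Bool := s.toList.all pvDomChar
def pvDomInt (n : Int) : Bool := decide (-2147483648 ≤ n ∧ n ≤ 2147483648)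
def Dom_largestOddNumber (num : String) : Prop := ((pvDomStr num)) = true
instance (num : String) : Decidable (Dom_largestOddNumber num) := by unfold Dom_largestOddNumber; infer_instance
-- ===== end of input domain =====

-- B replaces A's right-to-left early-return index loop by a balanced divide-and-conquer
-- recursion on string halves; equivalence on all inputs where A returns.

-- ===== PORT A =====
-- the 'while True' loop of A: r is Python's 'right' (left is always 0)
def pvLoopA (s : List Char) (r : Nat) : String :=
  match (PySem.List.pyGet? s (r : Int)).bind (fun c => PySem.Int.ofChars? [c]) with
  | none => ""  -- int(num[right]) raises (IndexError / ValueError): outside Pre_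
  | some n =>
    if PySem.Int.mod n 2 ≠ 0 then
      String.ofList (PySem.List.slice s none (some ((r : Int) + 1)))  -- num[:right+1]
    else
      match r with
      | 0 => ""  -- Python's 'right' would go negative here; unreachable from the entry point
      | r' + 1 =>
        if r' = 0 then  -- left == right
          match (PySem.List.pyGet? s (0 : Int)).bind (fun c => PySem.Int.ofChars? [c]) with
          | none => ""  -- int(num[left]) raises: outside Pre_
          | some m =>
            if PySem.Int.mod m 2 ≠ 0 then
              String.ofList (PySem.List.slice s none (some (1 : Int)))  -- num[left] (left = 0)
            else ""  -- break; return ""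
        else pvLoopA s r'

def largestOddNumber (num : String) : String :=
  if num.toList.length = 1 then
    match PySem.Int.ofStr? num with
    | none => ""  -- int(num) raises ValueError: outside Pre_
    | some n => if PySem.Int.mod n 2 ≠ 0 then num else ""
  else
    pvLoopA num.toList (num.toList.length - 1)

-- ===== PORT B =====
-- divide and conquer: left half + right half's answer when that is non-empty, else the
-- left half's answer; a single character answers itself iff it is an odd digit.
-- mid = len(num)//2 (floor division of non-negative lengths: Nat '/'); num[mid:] / num[:mid]
-- with 0 <= mid are exactly List.drop / List.take; Python's local 'right' is inlined (bound
-- once in Python, the same value at both uses).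
def pvDnc (s : List Char) : String :=
  if h : s.length ≤ 1 then
    -- Python: num if num and int(num) % 2 else ""
    if s = [] then ""
    else
      match PySem.Int.ofChars? s with
      | none => ""  -- int(num) raises ValueError: outside Pre_
      | some n => if PySem.Int.mod n 2 ≠ 0 then String.ofList s else ""
  else
    if pvDnc (s.drop (s.length / 2)) ≠ "" then
      String.ofList (s.take (s.length / 2) ++ (pvDnc (s.drop (s.length / 2))).toList)
    else
      pvDnc (s.take (s.length / 2))
termination_by s.length
decreasing_by
  · simp only [List.length_drop]; omega
  · simp only [List.length_take]; omega

def largestOddNumber_alt (num : String) : String := pvDnc num.toList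

-- ===== PRECONDITION & SPEC =====
-- Pre_ holds exactly where A returns: the string is non-empty and, scanning from the right past
-- even digits ('02468'), the scan either exhausts the string or meets an odd digit; everywhere else
-- A raises (IndexError on '', ValueError on the first inspected character that is not a digit).
def Pre_largestOddNumber (num : String) : Prop :=
  num.toList ≠ [] ∧
  "13579".toList.contains
    ((num.toList.reverse.dropWhile (fun c => "02468".toList.contains c)).headD '1') = true
instance (num : String) : Decidable (Pre_largestOddNumber num) := by unfold Pre_largestOddNumber; infer_instance
def pvWitness_largestOddNumber : String := "3542"

-- A raises IndexError on the empty string; B returns the empty string there (on every other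
-- input outside Pre_ both raise ValueError on the same non-digit character).
def Raises_largestOddNumber (num : String) : Prop := num = ""
instance (num : String) : Decidable (Raises_largestOddNumber num) := by unfold Raises_largestOddNumber; infer_instance
def pvRaiseWitness_largestOddNumber : String := ""
def pvRaiseWitnessOut_largestOddNumber : String := ""

def Spec_largestOddNumber (num : String) (out : String) : Prop := out = largestOddNumber_alt num
instance (num : String) (out : String) : Decidable (Spec_largestOddNumber num out) := by unfold Spec_largestOddNumber; infer_instance

-- ===== CLAIM (what is proved, stated in full; the proofs are below) =====
def Claim_equal_largestOddNumber : Prop := ∀ (num : String), Dom_largestOddNumber num → Pre_largestOddNumber num → Spec_largestOddNumber num (largestOddNumber num)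
def Claim_raises_largestOddNumber : Prop := (∀ (num : String), Dom_largestOddNumber num → Raises_largestOddNumber num → ¬ Pre_largestOddNumber num) ∧ (Dom_largestOddNumber (pvRaiseWitness_largestOddNumber) ∧ Raises_largestOddNumber (pvRaiseWitness_largestOddNumber) ∧ largestOddNumber_alt (pvRaiseWitness_largestOddNumber) = pvRaiseWitnessOut_largestOddNumber)

-- ===== LEMMAS AND PROOFS =====
set_option maxRecDepth 8192

theorem pv_even_sc (c : Char) (h : "02468".toList.contains c = true) :
    PySem.Int.ofChars? [c] = some ((c.toNat : Int) - 48) ∧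
      PySem.Int.mod ((c.toNat : Int) - 48) 2 = 0 ∧
      "13579".toList.contains c = false := by
  have hm : c = '0' ∨ c = '2' ∨ c = '4' ∨ c = '6' ∨ c = '8' := by simpa using h
  rcases hm with rfl|rfl|rfl|rfl|rfl <;> exact ⟨by decide, by decide, by decide⟩

theorem pv_odd_sc (c : Char) (h : "13579".toList.contains c = true) :
    PySem.Int.ofChars? [c] = some ((c.toNat : Int) - 48) ∧
      PySem.Int.mod ((c.toNat : Int) - 48) 2 ≠ 0 := by
  have hm : c = '1' ∨ c = '3' ∨ c = '5' ∨ c = '7' ∨ c = '9' := by simpa using h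
  rcases hm with rfl|rfl|rfl|rfl|rfl <;> exact ⟨by decide, by decide⟩

theorem pv_slice_take (s : List Char) (r : Nat) :
    PySem.List.slice s none (some ((r : Int) + 1)) = s.take (r+1) := by
  have := PySem.List.slice_to_natCast (xs := s) (b := r + 1)
  push_cast at this ⊢
  exact this

-- the loop on an all-even-digit prefix s[0..r]: it runs out and A returns ""
theorem pv_loopA_even (s : List Char) (r : Nat) (hr : r < s.length) (h1 : 1 ≤ r)
    (hs : ∀ j (hj : j < s.length), j ≤ r → "02468".toList.contains (s[j]'hj) = true) :
    pvLoopA s r = "" := by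
  induction r with
  | zero => omega
  | succ r' ih =>
    have hev := hs (r'+1) hr (by omega)
    rw [pvLoopA]
    have hsc : (PySem.List.pyGet? s ((r'+1 : Nat) : Int)).bind (fun c => PySem.Int.ofChars? [c])
        = some ((s[r'+1].toNat : Int) - 48) := by
      rw [PySem.List.pyGet?_ofNat (xs := s) (n := r'+1) hr]
      simp [(pv_even_sc _ hev).1]
    simp only [Nat.succ_eq_add_one, hsc]
    rw [if_neg (not_not_intro (pv_even_sc _ hev).2.1)]
    by_cases h0 : r' = 0
    · subst h0
      rw [if_pos rfl]
      have hev0 := hs 0 (by omega) (by omega)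
      have h0sc : (PySem.List.pyGet? s (0 : Int)).bind (fun c => PySem.Int.ofChars? [c])
          = some ((s[0].toNat : Int) - 48) := by
        rw [PySem.List.pyGet?_zero, List.getElem?_eq_getElem (by omega : 0 < s.length)]
        simp [(pv_even_sc _ hev0).1]
      simp only [h0sc]
      rw [if_neg (not_not_intro (pv_even_sc _ hev0).2.1)]
    · rw [if_neg h0]
      exact ih (by omega) (by omega) (fun j hj h2 => hs j hj (by omega))

-- the loop with an odd digit at index k and even digits at the indices k+1..r:
-- A returns the prefix up to and including the odd digit
theorem pv_loopA_odd (s : List Char) (k : Nat) (hk : k < s.length)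
    (hc : "13579".toList.contains (s[k]'hk) = true) (r : Nat) (hr : r < s.length) (hkr : k ≤ r)
    (hs : ∀ j (hj : j < s.length), k < j → j ≤ r → "02468".toList.contains (s[j]'hj) = true) :
    pvLoopA s r = String.ofList (s.take (k+1)) := by
  induction r with
  | zero =>
    have hk0 : k = 0 := by omega
    subst hk0
    rw [pvLoopA]
    have hsc : (PySem.List.pyGet? s ((0 : Nat) : Int)).bind (fun c => PySem.Int.ofChars? [c])
        = some ((s[0].toNat : Int) - 48) := by
      rw [PySem.List.pyGet?_ofNat (xs := s) (n := 0) hk]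
      simp [(pv_odd_sc _ hc).1]
    simp only [hsc]
    rw [if_pos ((pv_odd_sc _ hc).2), pv_slice_take s 0]
  | succ r' ih =>
    by_cases hkeq : k = r'+1
    · subst hkeq
      rw [pvLoopA]
      have hsc : (PySem.List.pyGet? s ((r'+1 : Nat) : Int)).bind (fun c => PySem.Int.ofChars? [c])
          = some ((s[r'+1].toNat : Int) - 48) := by
        rw [PySem.List.pyGet?_ofNat (xs := s) (n := r'+1) hr]
        simp [(pv_odd_sc _ hc).1]
      simp only [Nat.succ_eq_add_one, hsc]
      rw [if_pos ((pv_odd_sc _ hc).2), pv_slice_take s (r'+1)]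
    · have hev := hs (r'+1) hr (by omega) (by omega)
      rw [pvLoopA]
      have hsc : (PySem.List.pyGet? s ((r'+1 : Nat) : Int)).bind (fun c => PySem.Int.ofChars? [c])
          = some ((s[r'+1].toNat : Int) - 48) := by
        rw [PySem.List.pyGet?_ofNat (xs := s) (n := r'+1) hr]
        simp [(pv_even_sc _ hev).1]
      simp only [Nat.succ_eq_add_one, hsc]
      rw [if_neg (not_not_intro (pv_even_sc _ hev).2.1)]
      by_cases h0 : r' = 0
      · subst h0
        have hk0 : k = 0 := by omega
        subst hk0
        rw [if_pos rfl]
        have h0sc : (PySem.List.pyGet? s (0 : Int)).bind (fun c => PySem.Int.ofChars? [c])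
            = some ((s[0].toNat : Int) - 48) := by
          rw [PySem.List.pyGet?_zero, List.getElem?_eq_getElem hk]
          simp [(pv_odd_sc _ hc).1]
        simp only [h0sc]
        rw [if_pos ((pv_odd_sc _ hc).2)]
        rw [PySem.List.slice_to (xs := s) (b := 1) (by norm_num)]
        norm_num
      · rw [if_neg h0]
        exact ih (by omega) (by omega) (fun j hj h1 h2 => hs j hj h1 (by omega))

-- a list of even digits: B's recursion returns "" on it
theorem pvDnc_even (n : Nat) : ∀ (s : List Char), s.length ≤ n →
    (∀ x ∈ s, "02468".toList.contains x = true) → pvDnc s = "" := by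
  induction n with
  | zero =>
    intro s hl _
    have hs : s = [] := List.eq_nil_of_length_eq_zero (by omega)
    subst hs
    rw [pvDnc]
    simp
  | succ n ih =>
    intro s hl hev
    rw [pvDnc]
    by_cases h1 : s.length ≤ 1
    · rw [dif_pos h1]
      cases s with
      | nil => simp
      | cons c t =>
        have ht : t = [] := List.eq_nil_of_length_eq_zero (by simp only [List.length_cons] at h1; omega)
        subst ht
        rw [if_neg (by simp)]
        have hec := pv_even_sc c (hev c (by simp))
        simp only [hec.1]
        rw [if_neg (not_not_intro hec.2.1)]
    · rw [dif_neg h1]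
      have hd : pvDnc (s.drop (s.length / 2)) = "" :=
        ih _ (by simp only [List.length_drop]; omega)
          (fun x hx => hev x (List.mem_of_mem_drop hx))
      rw [if_neg (not_not_intro hd)]
      exact ih _ (by simp only [List.length_take]; omega)
        (fun x hx => hev x (List.mem_of_mem_take hx))

theorem pv_ofList_ne_empty (l : List Char) (h : l ≠ []) : String.ofList l ≠ "" := by
  intro he
  exact h (by simpa using congrArg String.toList he)

-- an odd digit followed only by even digits: B's recursion keeps everything up to it
theorem pvDnc_odd (n : Nat) : ∀ (p : List Char) (c : Char) (E : List Char),
    (p ++ c :: E).length ≤ n →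
    (∀ x ∈ E, "02468".toList.contains x = true) →
    "13579".toList.contains c = true →
    pvDnc (p ++ c :: E) = String.ofList (p ++ [c]) := by
  induction n with
  | zero => intro p c E hl _ _; simp at hl
  | succ n ih =>
    intro p c E hl hev hc
    have hlen : (p ++ c :: E).length = p.length + E.length + 1 := by simp; omega
    rw [pvDnc]
    by_cases h1 : (p ++ c :: E).length ≤ 1
    · have hp : p = [] := List.eq_nil_of_length_eq_zero (by omega)
      have hE : E = [] := List.eq_nil_of_length_eq_zero (by omega)
      subst hp; subst hE
      rw [dif_pos h1, if_neg (by simp)]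
      have hsc := pv_odd_sc c hc
      simp only [List.nil_append, hsc.1]
      rw [if_pos hsc.2]
    · rw [dif_neg h1]
      by_cases hm : (p ++ c :: E).length / 2 ≤ p.length
      · have hdrop : (p ++ c :: E).drop ((p ++ c :: E).length / 2)
            = p.drop ((p ++ c :: E).length / 2) ++ c :: E := by
          rw [List.drop_append,
            Nat.sub_eq_zero_of_le hm, List.drop_zero]
        have hr : pvDnc ((p ++ c :: E).drop ((p ++ c :: E).length / 2))
            = String.ofList (p.drop ((p ++ c :: E).length / 2) ++ [c]) := by
          rw [hdrop]
          exact ih _ c E (by simp only [List.length_append, List.length_drop, List.length_cons] at h1 hl hm ⊢; omega) hev hc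
        rw [hr, if_pos (pv_ofList_ne_empty _ (by simp))]
        rw [List.take_append, Nat.sub_eq_zero_of_le hm,
          List.take_zero, List.append_nil]
        rw [String.toList_ofList, ← List.append_assoc, List.take_append_drop]
      · have hm' : p.length < (p ++ c :: E).length / 2 := by omega
        have hdrop : (p ++ c :: E).drop ((p ++ c :: E).length / 2)
            = E.drop ((p ++ c :: E).length / 2 - p.length - 1) := by
          rw [List.drop_append, List.drop_of_length_le (by omega),
            List.nil_append,
            show (p ++ c :: E).length / 2 - p.length
              = ((p ++ c :: E).length / 2 - p.length - 1) + 1 by omega,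
            List.drop_succ_cons]
          simp
        have h0 : pvDnc ((p ++ c :: E).drop ((p ++ c :: E).length / 2)) = "" := by
          rw [hdrop]
          exact pvDnc_even _ _ le_rfl (fun x hx => hev x (List.mem_of_mem_drop hx))
        rw [if_neg (not_not_intro h0)]
        have htake : (p ++ c :: E).take ((p ++ c :: E).length / 2)
            = p ++ c :: E.take ((p ++ c :: E).length / 2 - p.length - 1) := by
          rw [List.take_append, List.take_of_length_le (le_of_lt hm'),
            show (p ++ c :: E).length / 2 - p.length
              = ((p ++ c :: E).length / 2 - p.length - 1) + 1 by
                simp only [List.length_append, List.length_cons] at hm' ⊢; omega,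
            List.take_succ_cons]
          simp
        rw [htake]
        exact ih p c _ (by simp only [List.length_append, List.length_cons, List.length_take] at h1 hl hm' ⊢; omega)
          (fun x hx => hev x (List.mem_of_mem_take hx)) hc

-- ===== VERDICT (by name: the statement is the Claim_ definition above) =====
theorem largestOddNumber_spec : Claim_equal_largestOddNumber := by
  intro num _ hpre
  obtain ⟨hne, hh⟩ := hpre
  unfold Spec_largestOddNumber largestOddNumber largestOddNumber_alt
  have hof : PySem.Int.ofStr? num = PySem.Int.ofChars? num.toList := by simp [PySem.Int.ofStr?]
  cases ht : num.toList.reverse.dropWhile (fun c => "02468".toList.contains c) with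
  | nil =>
    -- every character is an even digit: both sides are ""
    have hall : ∀ x ∈ num.toList, "02468".toList.contains x = true := by
      intro x hx
      exact List.dropWhile_eq_nil_iff.mp ht x (List.mem_reverse.mpr hx)
    rw [pvDnc_even num.toList.length num.toList le_rfl hall]
    by_cases hlen : num.toList.length = 1
    · obtain ⟨c, hc⟩ := List.length_eq_one_iff.mp hlen
      rw [if_pos hlen]
      have hec := pv_even_sc c (hall c (by rw [hc]; simp))
      simp only [hof, hc, hec.1]
      rw [if_neg (not_not_intro hec.2.1)]
    · rw [if_neg hlen]
      have hl1 : 0 < num.toList.length := List.length_pos_of_ne_nil hne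
      rw [pv_loopA_even num.toList (num.toList.length - 1) (by omega) (by omega)
        (fun j hj _ => hall _ (List.getElem_mem hj))]
  | cons c t' =>
    have hoddc : "13579".toList.contains c = true := by rw [ht] at hh; simpa using hh
    have heven : ∀ d ∈ num.toList.reverse.takeWhile (fun c => "02468".toList.contains c),
        "02468".toList.contains d = true := fun d hd => List.mem_takeWhile_imp hd
    have hrev : num.toList.reverse
        = num.toList.reverse.takeWhile (fun c => "02468".toList.contains c) ++ c :: t' := by
      conv_lhs => rw [← List.takeWhile_append_dropWhile
        (p := fun c => "02468".toList.contains c) (l := num.toList.reverse), ht]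
    have hdecomp : num.toList = t'.reverse ++ c ::
        (num.toList.reverse.takeWhile (fun c => "02468".toList.contains c)).reverse := by
      have h := congrArg List.reverse
        (List.takeWhile_append_dropWhile
          (p := fun c => "02468".toList.contains c) (l := num.toList.reverse))
      rw [ht, List.reverse_reverse] at h
      conv_lhs => rw [← h]
      simp [List.reverse_append]
    -- B's divide and conquer keeps everything up to the last odd digit
    have hBv : pvDnc num.toList = String.ofList (t'.reverse ++ [c]) := by
      conv_lhs => rw [hdecomp]
      exact pvDnc_odd _ t'.reverse c _ (by rw [← hdecomp]) 
        (fun x hx => heven x (List.mem_reverse.mp hx)) hoddc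
    rw [hBv]
    have hk : t'.length < num.toList.length := by
      conv_rhs => rw [hdecomp]
      simp only [List.length_append, List.length_reverse, List.length_cons]
      omega
    have hodd_at : num.toList[t'.length]'hk = c := by
      have hq : num.toList[t'.length]? = some c := by
        rw [hdecomp, List.getElem?_append_right (by simp)]
        simp
      exact Option.some.inj ((List.getElem?_eq_getElem hk).symm.trans hq)
    have htakeB : num.toList.take (t'.length + 1) = t'.reverse ++ [c] := by
      conv_lhs => rw [hdecomp]
      rw [show t'.reverse ++ c ::
          (num.toList.reverse.takeWhile (fun c => "02468".toList.contains c)).reverse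
          = (t'.reverse ++ [c]) ++
          (num.toList.reverse.takeWhile (fun c => "02468".toList.contains c)).reverse by simp]
      exact List.take_left' (by simp)
    by_cases hlen : num.toList.length = 1
    · obtain ⟨c0, hc0⟩ := List.length_eq_one_iff.mp hlen
      have hc0' : c0 = c ∧ t' = [] := by
        rw [hc0] at ht
        simp only [List.reverse_cons, List.reverse_nil, List.nil_append,
          List.dropWhile_cons, List.dropWhile_nil] at ht
        split at ht
        · simp at ht
        · injection ht with h1 h2
          exact ⟨h1, h2.symm⟩
      obtain ⟨rfl, rfl⟩ := hc0'
      rw [if_pos hlen]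
      have hsc := pv_odd_sc c0 hoddc
      simp only [hof, hc0, hsc.1]
      rw [if_pos hsc.2]
      simp only [List.reverse_nil, List.nil_append]
      rw [← hc0, String.ofList_toList]
    · rw [if_neg hlen]
      have hsj : ∀ j (hj : j < num.toList.length), t'.length < j →
          j ≤ num.toList.length - 1 →
          "02468".toList.contains (num.toList[j]'hj) = true := by
        intro j hj h1 _
        have hq : (t'.reverse ++ c ::
            (num.toList.reverse.takeWhile (fun c => "02468".toList.contains c)).reverse)[j]?
            = some (num.toList[j]'hj) := by
          rw [← hdecomp]
          exact List.getElem?_eq_getElem hj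
        rw [List.getElem?_append_right (by simp; omega)] at hq
        rw [show j - t'.reverse.length = (j - t'.reverse.length - 1) + 1 by simp; omega] at hq
        rw [List.getElem?_cons_succ] at hq
        exact heven _ (List.mem_reverse.mp (List.mem_of_getElem? hq))
      rw [pv_loopA_odd num.toList t'.length hk (by rw [hodd_at]; exact hoddc)
        (num.toList.length - 1) (by omega) (by omega) hsj, htakeB]

@[simp] theorem largestOddNumber_raises : Claim_raises_largestOddNumber := by
  unfold Claim_raises_largestOddNumber
  refine ⟨fun num _ h hp => hp.1 (by rw [h]; rfl), by decide, by decide, ?_⟩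
  show pvDnc [] = ""
  rw [pvDnc]
  simp
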